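-- pv_equiv track=rewrite | github.com/makecent/APN | custom_modules/apn_utils.py | cluster_and_flatten
-- ===== SOURCE A (Python) =====
-- def cluster_and_flatten(arr, gap):
--     # cluster arr wit gap smaller than a value
--     m = [[arr[0]]]
--     for x in arr[1:]:
--         if x - m[-1][0] < gap:
--             m[-1].append(x)
--         else:
--             m.append([x])
--     # fetch element from each cluster, have many choices while here we only keep first ele in each cluster.
--     r = [c[0] for c in m]
--     # r = []
--     # for c in m:
--     #     r.extend([c[0], c[len(c)//2], c[-1]])
--     return r
-- ===== SOURCE B (Python) =====
-- def cluster_and_flatten(arr, gap):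
--     # Recursive cluster-skipping: the head of the answer is arr[0]; scan
--     # forward for the first element at least `gap` beyond it (the next
--     # cluster's start) and recurse on the suffix from there.
--     if not arr:
--         return []
--     a = arr[0]
--     i = 1
--     while i < len(arr) and arr[i] - a < gap:
--         i += 1
--     return [a] + cluster_and_flatten(arr[i:], gap)
-- ===== Notes on version B (the rewrite author's own statement) =====
-- stated objective: alternative
-- what changed: B replaces A's element-wise stateful pass that appends every element into a list-of-lists and then maps out cluster heads by a recursion on cluster boundaries: emit the head, skip the whole cluster (first index at least gap beyond the head), recurse on the remaining suffix.
import Mathlib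
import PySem

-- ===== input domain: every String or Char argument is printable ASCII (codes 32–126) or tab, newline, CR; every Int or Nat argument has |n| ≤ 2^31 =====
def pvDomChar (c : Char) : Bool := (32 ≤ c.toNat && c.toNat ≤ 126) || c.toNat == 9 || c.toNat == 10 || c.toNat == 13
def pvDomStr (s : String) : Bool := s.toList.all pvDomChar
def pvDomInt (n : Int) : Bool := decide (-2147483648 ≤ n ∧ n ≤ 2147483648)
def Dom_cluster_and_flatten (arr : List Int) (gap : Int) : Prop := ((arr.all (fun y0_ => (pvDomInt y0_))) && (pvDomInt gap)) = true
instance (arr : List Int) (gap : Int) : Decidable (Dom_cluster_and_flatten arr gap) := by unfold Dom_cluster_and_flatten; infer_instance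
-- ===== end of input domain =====

-- B replaces A's stateful build-clusters-then-take-heads pass by a recursion on cluster
-- boundaries (emit head, skip the cluster, recurse); objective: alternative decomposition.

-- ===== PORT A =====
-- m[-1].append(x) : rebuild the cluster list with x appended to its last cluster
def pvPushLast (m : List (List Int)) (x : Int) : List (List Int) :=
  match m with
  | [] => [[x]]
  | [c] => [c ++ [x]]
  | c :: rest => c :: pvPushLast rest x

-- m[-1][0] (the default 0 is never reached: m and its clusters stay nonempty in A's loop)
def pvLastFirst (m : List (List Int)) : Int :=
  match m with
  | [] => 0
  | [c] => c.headD 0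
  | _ :: rest => pvLastFirst rest

def cluster_and_flatten (arr : List Int) (gap : Int) : List Int :=
  match arr with
  | [] => []  -- unreachable under Pre_ (Python raises IndexError here)
  | a :: rest =>
    let m := rest.foldl
      (fun m x => if x - pvLastFirst m < gap then pvPushLast m x else m ++ [[x]])
      [[a]]
    m.map (fun c => c.headD 0)

-- ===== PORT B =====
-- the while loop advancing i past elements with arr[i] - a < gap, then slicing arr[i:],
-- is exactly dropWhile on the tail
def cluster_and_flatten_alt (arr : List Int) (gap : Int) : List Int :=
  match arr with
  | [] => []
  | a :: rest =>
    a :: cluster_and_flatten_alt (rest.dropWhile (fun x => decide (x - a < gap))) gap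
termination_by arr.length
decreasing_by
  simpa using Nat.lt_succ_of_le (List.length_dropWhile_le _ _)

-- ===== PRECONDITION & SPEC =====
-- Pre_ excludes exactly the empty list, on which Python A raises IndexError at arr[0].
def Pre_cluster_and_flatten (arr : List Int) (gap : Int) : Prop := arr ≠ []
instance (arr : List Int) (gap : Int) : Decidable (Pre_cluster_and_flatten arr gap) := by unfold Pre_cluster_and_flatten; infer_instance
def pvWitness_cluster_and_flatten : List Int × Int := ([1, 2, 10, 11, 30], 5)

def Spec_cluster_and_flatten (arr : List Int) (gap : Int) (out : List Int) : Prop := out = cluster_and_flatten_alt arr gap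
instance (arr : List Int) (gap : Int) (out : List Int) : Decidable (Spec_cluster_and_flatten arr gap out) := by unfold Spec_cluster_and_flatten; infer_instance

-- ===== CLAIM (what is proved, stated in full; the proofs are below) =====
def Claim_equal_cluster_and_flatten : Prop := ∀ (arr : List Int) (gap : Int), Dom_cluster_and_flatten arr gap → Pre_cluster_and_flatten arr gap → Spec_cluster_and_flatten arr gap (cluster_and_flatten arr gap)
-- ===== LEMMAS AND PROOFS =====

-- clusters stay nonempty throughout A's loop
def pvGood (m : List (List Int)) : Prop := m ≠ [] ∧ ∀ c ∈ m, c ≠ []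

lemma pvPushLast_good (m : List (List Int)) (x : Int) (h : pvGood m) : pvGood (pvPushLast m x) := by
  obtain ⟨hne, hall⟩ := h
  induction m with
  | nil => exact absurd rfl hne
  | cons c rest ih =>
    cases rest with
    | nil => exact ⟨by simp [pvPushLast], by intro d hd; simp [pvPushLast] at hd; subst hd; simp⟩
    | cons c2 rest2 =>
      have := ih (by simp) (fun d hd => hall d (List.mem_cons_of_mem _ hd))
      refine ⟨by simp [pvPushLast], ?_⟩
      intro d hd
      simp only [pvPushLast] at hd
      rcases List.mem_cons.mp hd with h1 | h2
      · subst h1; exact hall _ (by simp)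
      · exact this.2 d h2

lemma pvPushLast_map_head (m : List (List Int)) (x : Int) (h : pvGood m) :
    (pvPushLast m x).map (fun c => c.headD 0) = m.map (fun c => c.headD 0) := by
  obtain ⟨hne, hall⟩ := h
  induction m with
  | nil => exact absurd rfl hne
  | cons c rest ih =>
    cases rest with
    | nil =>
      have hc : c ≠ [] := hall c (by simp)
      cases c with
      | nil => exact absurd rfl hc
      | cons a t => simp [pvPushLast]
    | cons c2 rest2 =>
      have := ih (by simp) (fun d hd => hall d (List.mem_cons_of_mem _ hd))
      simp only [pvPushLast, List.map_cons]
      rw [this]; simp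

lemma pvPushLast_lastFirst (m : List (List Int)) (x : Int) (h : pvGood m) :
    pvLastFirst (pvPushLast m x) = pvLastFirst m := by
  obtain ⟨hne, hall⟩ := h
  induction m with
  | nil => exact absurd rfl hne
  | cons c rest ih =>
    cases rest with
    | nil =>
      have hc : c ≠ [] := hall c (by simp)
      cases c with
      | nil => exact absurd rfl hc
      | cons a t => simp [pvPushLast, pvLastFirst]
    | cons c2 rest2 =>
      have := ih (by simp) (fun d hd => hall d (List.mem_cons_of_mem _ hd))
      simp only [pvPushLast]
      obtain ⟨d, ds, h2⟩ : ∃ d ds, pvPushLast (c2 :: rest2) x = d :: ds := by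
        cases rest2 <;> simp [pvPushLast]
      rw [h2]
      have h3 : pvLastFirst (c :: d :: ds) = pvLastFirst (d :: ds) := by simp [pvLastFirst]
      rw [h3, ← h2]
      simpa [pvLastFirst] using this

lemma pvLastFirst_append_singleton (m : List (List Int)) (x : Int) :
    pvLastFirst (m ++ [[x]]) = x := by
  induction m with
  | nil => simp [pvLastFirst]
  | cons c rest ih =>
    cases rest with
    | nil => simp [pvLastFirst]
    | cons c2 rest2 => simpa [pvLastFirst] using ih

lemma pvGood_append_singleton (m : List (List Int)) (x : Int) (h : ∀ c ∈ m, c ≠ []) :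
    pvGood (m ++ [[x]]) := by
  refine ⟨by simp, ?_⟩
  intro d hd
  rcases List.mem_append.mp hd with h1 | h2
  · exact h d h1
  · simp at h2; subst h2; simp

-- proof-side anchor fold: A's pass reduced to (emitted heads, current anchor)
def pvStep (gap : Int) (s : List Int × Int) (x : Int) : List Int × Int :=
  if x - s.2 ≥ gap then (s.1 ++ [x], x) else s

-- loop invariant relating A's cluster list to the anchor fold
lemma pv_fold_invariant (rest : List Int) (gap : Int) :
    ∀ (m : List (List Int)), pvGood m →
    (rest.foldl (fun m x => if x - pvLastFirst m < gap then pvPushLast m x else m ++ [[x]]) m).map (fun c => c.headD 0)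
      = (rest.foldl (pvStep gap) (m.map (fun c => c.headD 0), pvLastFirst m)).1 := by
  induction rest with
  | nil => intro m _; simp
  | cons x xs ih =>
    intro m hm
    simp only [List.foldl_cons]
    by_cases h : x - pvLastFirst m < gap
    · have hn : ¬ (x - pvLastFirst m ≥ gap) := by omega
      have hs : pvStep gap (m.map (fun c => c.headD 0), pvLastFirst m) x
          = (m.map (fun c => c.headD 0), pvLastFirst m) := by simp [pvStep, hn]
      rw [if_pos h, hs]
      rw [ih (pvPushLast m x) (pvPushLast_good m x hm)]
      rw [pvPushLast_map_head m x hm, pvPushLast_lastFirst m x hm]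
    · have hy : x - pvLastFirst m ≥ gap := by omega
      have hs : pvStep gap (m.map (fun c => c.headD 0), pvLastFirst m) x
          = (m.map (fun c => c.headD 0) ++ [x], x) := by simp [pvStep, hy]
      rw [if_neg h, hs]
      rw [ih (m ++ [[x]]) (pvGood_append_singleton m x hm.2)]
      rw [pvLastFirst_append_singleton]
      simp

-- the anchor fold equals B's cluster-skipping recursion
lemma pv_fold_eq_alt (gap : Int) : ∀ (rest : List Int) (a : Int) (acc : List Int),
    (rest.foldl (pvStep gap) (acc ++ [a], a)).1 = acc ++ cluster_and_flatten_alt (a :: rest) gap := by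
  intro rest
  induction rest with
  | nil =>
    intro a acc
    simp [cluster_and_flatten_alt]
  | cons x xs ih =>
    intro a acc
    by_cases h : x - a < gap
    · have hn : ¬ (x - a ≥ gap) := by omega
      simp only [List.foldl_cons, pvStep, hn, if_false]
      rw [ih a acc]
      have : cluster_and_flatten_alt (a :: x :: xs) gap = cluster_and_flatten_alt (a :: xs) gap := by
        rw [cluster_and_flatten_alt, cluster_and_flatten_alt]
        simp [List.dropWhile, h]
      rw [this]
    · have hy : x - a ≥ gap := by omega
      simp only [List.foldl_cons, pvStep, hy, if_true]
      have : acc ++ [a] ++ [x] = (acc ++ [a]) ++ [x] := by simp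
      rw [this, ih x (acc ++ [a])]
      have hd : cluster_and_flatten_alt (a :: x :: xs) gap = a :: cluster_and_flatten_alt (x :: xs) gap := by
        rw [cluster_and_flatten_alt]
        simp [List.dropWhile, h]
      rw [hd]
      simp

-- ===== VERDICT (by name: the statement is the Claim_ definition above) =====
theorem cluster_and_flatten_spec : Claim_equal_cluster_and_flatten := by
  intro arr gap _ hpre
  unfold Spec_cluster_and_flatten cluster_and_flatten
  cases arr with
  | nil => exact absurd rfl hpre
  | cons a rest =>
    simp only []
    have h1 := pv_fold_invariant rest gap [[a]] ⟨by simp, by intro c hc; simp at hc; subst hc; simp⟩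
    have h2 := pv_fold_eq_alt gap rest a []
    simp only [pvLastFirst, List.map, List.headD, List.nil_append] at h1 h2 ⊢
    rw [h1, h2]
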